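-- pv_equiv track=rewrite | github.com/douzujun/Python-Foundation-Suda | Exercise_postgraduate/python_project/python_suda/Rush/py08_review08_miterm2018_03.py | splitByPrime
-- ===== SOURCE A (Python) =====
-- import math
-- from functools import reduce
--
-- def is_prime(n):
--     if n < 2:
--         return False
--     top = int(math.sqrt(n))
--     i = 2
--     while i <= top:
--         if n % i == 0:
--             return False
--         i = i + 1
--     return True
--
-- def splitByPrime(li):
--     ans = []
--     rlen = len(li)
--
--     i = 0
--     while i < rlen:
--         no_pm = []
--         flag = 0
--         j = i
--         while j < rlen:
--             if not is_prime(li[j]):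
--                 no_pm.append(li[j])
--             else:
--                 flag = 1
--                 break
--             j = j + 1
--         # 有非素数
--         if no_pm:
--             ans.append(reduce(lambda x, y: x*10+y, no_pm))
--         if flag:
--             while j < rlen:
--                 if is_prime(li[j]):
--                     ans.append(li[j])
--                 else:
--                     break
--                 j = j + 1
--         i = j
--     return ans
-- ===== SOURCE B (Python) =====
-- import math
--
-- def is_prime(n):
--     if n < 2:
--         return False
--     top = int(math.sqrt(n))
--     i = 2
--     while i <= top:
--         if n % i == 0:
--             return False
--         i = i + 1
--     return True
--
-- def splitByPrime(li):
--     ans = []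
--     cur = None
--     for x in li:
--         if is_prime(x):
--             if cur is not None:
--                 ans.append(cur)
--                 cur = None
--             ans.append(x)
--         else:
--             cur = x if cur is None else cur * 10 + x
--     if cur is not None:
--         ans.append(cur)
--     return ans
-- ===== Notes on version B (the rewrite author's own statement) =====
-- stated objective: simpler
-- what changed: Replaces the nested index-driven while-loops, the temporary no_pm list and the reduce call with one flat for-loop over li that streams a single integer accumulator cur, flushing it whenever a prime is met and once at the end.
import Mathlib
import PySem

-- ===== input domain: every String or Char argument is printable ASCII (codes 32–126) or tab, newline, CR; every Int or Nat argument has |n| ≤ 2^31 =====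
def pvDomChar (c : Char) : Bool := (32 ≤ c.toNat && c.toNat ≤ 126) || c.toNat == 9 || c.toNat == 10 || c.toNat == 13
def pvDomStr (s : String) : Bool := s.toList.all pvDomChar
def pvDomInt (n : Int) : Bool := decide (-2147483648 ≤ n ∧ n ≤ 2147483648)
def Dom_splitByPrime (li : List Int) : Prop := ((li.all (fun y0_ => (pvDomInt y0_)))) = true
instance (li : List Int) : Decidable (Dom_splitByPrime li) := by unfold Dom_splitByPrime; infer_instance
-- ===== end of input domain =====

-- B replaces A's nested index-driven run-scanning loops (no_pm list + reduce) with one flat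
-- streaming fold that carries a single Option-Int accumulator; objective: simpler, same cost.


-- ===== PORT A =====
-- is_prime: shared helper, identical in Source A and Source B.
-- Python's `while i <= top: if n % i == 0: return False; i += 1; return True`
def trialLoop (n : Int) (i : Int) (top : Int) : Bool :=
  if i ≤ top then
    if n % i == 0 then false else trialLoop n (i + 1) top
  else true
termination_by (top + 1 - i).toNat
decreasing_by omega

-- `int(math.sqrt(n))` = Nat.sqrt exactly for the 2 ≤ n ≤ 2^31 reached here (double sqrt is
-- correctly rounded and cannot cross an integer at this magnitude); n ≥ 2 so Lean's % = Python's %.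
def isPrime (n : Int) : Bool :=
  if n < 2 then false
  else trialLoop n 2 (Int.ofNat (Nat.sqrt n.toNat))

-- A's inner first while: collects li[j:] prefix of non-primes (no_pm) and the rest.
def scanNP : List Int → List Int × List Int
  | [] => ([], [])
  | x :: rest =>
    if isPrime x then ([], x :: rest)
    else
      let p := scanNP rest
      (x :: p.1, p.2)

-- A's inner second while (the `flag` loop): collects the prefix of primes and the rest.
def scanP : List Int → List Int × List Int
  | [] => ([], [])
  | x :: rest =>
    if isPrime x then
      let p := scanP rest
      (x :: p.1, p.2)
    else ([], x :: rest)

theorem scanNP_len_le : ∀ l : List Int, (scanNP l).2.length ≤ l.length := by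
  intro l
  induction l with
  | nil => simp [scanNP]
  | cons x rest ih =>
    simp only [scanNP]
    split
    · simp
    · simp only [List.length_cons]
      omega

theorem scanP_len_le : ∀ l : List Int, (scanP l).2.length ≤ l.length := by
  intro l
  induction l with
  | nil => simp [scanP]
  | cons x rest ih =>
    simp only [scanP]
    split
    · simp only [List.length_cons]
      omega
    · simp

theorem key_lt (x : Int) (rest : List Int) :
    ((scanP (scanNP (x :: rest)).2).2).length < (x :: rest).length := by
  by_cases h : isPrime x = true
  · simp only [scanNP, h, if_pos, scanP]
    have := scanP_len_le rest
    simp only [List.length_cons]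
    omega
  · simp only [scanNP, h, if_neg, Bool.false_eq_true, not_false_iff]
    have h1 := scanNP_len_le rest
    have h2 := scanP_len_le (scanNP rest).2
    simp only [List.length_cons]
    omega

-- A's outer while over i (here: over the remaining suffix), appending to ans.
-- `flag` ≠ 0 iff the rest after scanNP is nonempty; scanP on [] appends nothing, so the
-- flag guard is behaviour-free and folded into the unconditional scanP call.
def outerA (ans : List Int) (li : List Int) : List Int :=
  match li with
  | [] => ans
  | x :: rest =>
    let np := (scanNP (x :: rest)).1
    let r1 := (scanNP (x :: rest)).2
    -- if no_pm: ans.append(reduce(lambda x, y: x*10+y, no_pm))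
    let ans1 := match np with
      | [] => ans
      | h :: t => ans ++ [t.foldl (fun a b => a * 10 + b) h]
    outerA (ans1 ++ (scanP r1).1) (scanP r1).2
termination_by li.length
decreasing_by exact key_lt x rest

def splitByPrime (li : List Int) : List Int := outerA [] li

-- ===== PORT B =====
def stepB (st : List Int × Option Int) (x : Int) : List Int × Option Int :=
  if isPrime x then
    (match st.2 with
     | none => st.1 ++ [x]
     | some c => st.1 ++ [c, x], none)
  else
    (st.1, some (match st.2 with | none => x | some c => c * 10 + x))

def splitByPrime_alt (li : List Int) : List Int :=
  let st := li.foldl stepB ([], none)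
  match st.2 with
  | none => st.1
  | some c => st.1 ++ [c]

-- ===== PRECONDITION & SPEC =====
def Spec_splitByPrime (li : List Int) (out : List Int) : Prop := out = splitByPrime_alt li
instance (li : List Int) (out : List Int) : Decidable (Spec_splitByPrime li out) := by unfold Spec_splitByPrime; infer_instance

-- ===== CLAIM (what is proved, stated in full; the proofs are below) =====
def Claim_equal_splitByPrime : Prop := ∀ (li : List Int), Dom_splitByPrime li → Spec_splitByPrime li (splitByPrime li)

-- ===== LEMMAS AND PROOFS =====

def acc1 (c : Option Int) (x : Int) : Option Int :=
  some (match c with | none => x | some v => v * 10 + x)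

theorem foldl_acc1_some : ∀ (t : List Int) (c : Int),
    List.foldl acc1 (some c) t = some (t.foldl (fun a b => a * 10 + b) c) := by
  intro t
  induction t with
  | nil => intro c; rfl
  | cons x xs ih => intro c; simpa [acc1] using ih (c * 10 + x)

theorem L1 : ∀ (l ans : List Int) (cur : Option Int),
    List.foldl stepB (ans, cur) l
      = List.foldl stepB (ans, (scanNP l).1.foldl acc1 cur) (scanNP l).2 := by
  intro l
  induction l with
  | nil => intro ans cur; rfl
  | cons x rest ih =>
    intro ans cur
    by_cases h : isPrime x = true
    · simp [scanNP, h]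
    · have hstep : stepB (ans, cur) x = (ans, acc1 cur x) := by
        simp [stepB, h, acc1]
      simp only [scanNP, h, if_neg, Bool.false_eq_true, not_false_iff, List.foldl_cons, hstep]
      exact ih ans (acc1 cur x)

theorem L2 : ∀ (l ans : List Int),
    List.foldl stepB (ans, none) l
      = List.foldl stepB (ans ++ (scanP l).1, none) (scanP l).2 := by
  intro l
  induction l with
  | nil => intro ans; simp [scanP]
  | cons x rest ih =>
    intro ans
    by_cases h : isPrime x = true
    · have hstep : stepB (ans, none) x = (ans ++ [x], none) := by simp [stepB, h]
      simp only [scanP, h, if_pos, List.foldl_cons, hstep]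
      simpa [List.append_assoc] using ih (ans ++ [x])
    · simp [scanP, h]

theorem scanNP_head_prime : ∀ (l : List Int) (y : Int) (r' : List Int),
    (scanNP l).2 = y :: r' → isPrime y = true := by
  intro l
  induction l with
  | nil => intro y r' h; simp [scanNP] at h
  | cons x rest ih =>
    intro y r' h
    by_cases hp : isPrime x = true
    · simp [scanNP, hp] at h
      rw [← h.1]; exact hp
    · simp [scanNP, hp] at h
      exact ih y r' h

def finB (st : List Int × Option Int) : List Int :=
  match st.2 with
  | none => st.1
  | some c => st.1 ++ [c]

theorem main_lemma : ∀ (n : ℕ) (l ans : List Int), l.length ≤ n →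
    outerA ans l = finB (List.foldl stepB (ans, none) l) := by
  intro n
  induction n with
  | zero =>
    intro l ans hl
    have : l = [] := List.eq_nil_of_length_eq_zero (Nat.le_zero.mp hl)
    subst this
    simp [outerA, finB]
  | succ n ih =>
    intro l ans hl
    match l with
    | [] => simp [outerA, finB]
    | x :: rest =>
      have hlt := key_lt x rest
      have hr2 : ((scanP (scanNP (x :: rest)).2).2).length ≤ n := by
        simp only [List.length_cons] at hlt hl; omega
      rw [L1 (x :: rest) ans none]
      rcases hnp : (scanNP (x :: rest)).1 with _ | ⟨h, t⟩
      · -- no non-primes at the front: li[0] is prime, r1 = x :: rest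
        have hr1 : (scanNP (x :: rest)).2 = x :: rest := by
          by_cases hp : isPrime x = true
          · simp [scanNP, hp]
          · simp [scanNP, hp] at hnp
        simp only [List.foldl_nil]
        rw [L2 ((scanNP (x :: rest)).2) ans]
        rw [outerA]
        simp only [hnp]
        exact ih _ _ hr2
      · -- leading non-prime run h :: t, folded value v
        have hacc : List.foldl acc1 none (h :: t)
            = some (t.foldl (fun a b => a * 10 + b) h) := by
          simp only [List.foldl_cons, acc1]
          exact foldl_acc1_some t h
        rw [hacc]
        rcases hr1 : (scanNP (x :: rest)).2 with _ | ⟨y, r1'⟩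
        · -- nothing after the run
          rw [outerA]
          simp [hnp, hr1, scanP, finB, outerA]
        · -- a prime y follows; flush then prime run
          have hy : isPrime y = true := scanNP_head_prime _ y r1' hr1
          have hstep : stepB (ans, some (t.foldl (fun a b => a * 10 + b) h)) y
              = (ans ++ [t.foldl (fun a b => a * 10 + b) h, y], none) := by
            simp [stepB, hy]
          simp only [List.foldl_cons, hstep]
          rw [L2 r1' (ans ++ [t.foldl (fun a b => a * 10 + b) h, y])]
          rw [outerA]
          simp only [hnp, hr1, scanP, hy, if_pos]
          have hr2' : ((scanP r1').2).length ≤ n := by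
            simp only [hr1, scanP, hy, if_pos] at hr2
            exact hr2
          have := ih (scanP r1').2
              (ans ++ [t.foldl (fun a b => a * 10 + b) h] ++ y :: (scanP r1').1) hr2'
          simp only [List.append_assoc, List.cons_append,
            List.nil_append] at this ⊢
          exact this

-- ===== VERDICT (by name: the statement is the Claim_ definition above) =====
theorem splitByPrime_spec : Claim_equal_splitByPrime := by
  intro li _
  unfold Spec_splitByPrime splitByPrime splitByPrime_alt
  simpa [finB] using main_lemma li.length li [] (le_refl _)
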